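-- pv_equiv track=rewrite | github.com/Taichi-Kamei/ENPH353_Controller | node/image_processor.py | split_into_monospace_boxes
-- ===== SOURCE A (Python) =====
-- def split_into_monospace_boxes(x, y, w, h, num_letters):
--     """
--     Split a wide bounding box into equal-width boxes for monospace letters
--     """
--     split_boxes = []
--     letter_width = w // num_letters
--
--     for i in range(num_letters):
--         letter_x = x + (i * letter_width)
--         # Ensure we don't go beyond original bounds
--         letter_w = letter_width if i < num_letters - 1 else w - (i * letter_width)
--
--         split_boxes.append((letter_x, y, letter_w, h))
--
--     return split_boxes
-- ===== SOURCE B (Python) =====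
-- def split_into_monospace_boxes(x, y, w, h, num_letters):
--     """
--     Split a wide bounding box into equal-width boxes for monospace letters.
--     Divide-and-conquer: split the run of letters in half, solve each half on
--     its sub-box and concatenate; a single letter's box is just the remaining
--     box, so the rightmost box absorbs the leftover width with no index math.
--     """
--     letter_width = w // num_letters
--
--     def go(cur_x, rem_w, k):
--         if k <= 0:
--             return []
--         if k == 1:
--             return [(cur_x, y, rem_w, h)]
--         m = k // 2
--         return (go(cur_x, m * letter_width, m)
--                 + go(cur_x + m * letter_width, rem_w - m * letter_width, k - m))
--
--     return go(x, w, num_letters)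
-- ===== Notes on version B (the rewrite author's own statement) =====
-- stated objective: alternative
-- what changed: Replaces A's indexed single pass (per-iteration width conditional computed from i*letter_width) by a divide-and-conquer recursion that halves the run of letters and solves each half on its sub-box; a one-letter box is simply the remaining width, so there is no last-box index formula.
import Mathlib
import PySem

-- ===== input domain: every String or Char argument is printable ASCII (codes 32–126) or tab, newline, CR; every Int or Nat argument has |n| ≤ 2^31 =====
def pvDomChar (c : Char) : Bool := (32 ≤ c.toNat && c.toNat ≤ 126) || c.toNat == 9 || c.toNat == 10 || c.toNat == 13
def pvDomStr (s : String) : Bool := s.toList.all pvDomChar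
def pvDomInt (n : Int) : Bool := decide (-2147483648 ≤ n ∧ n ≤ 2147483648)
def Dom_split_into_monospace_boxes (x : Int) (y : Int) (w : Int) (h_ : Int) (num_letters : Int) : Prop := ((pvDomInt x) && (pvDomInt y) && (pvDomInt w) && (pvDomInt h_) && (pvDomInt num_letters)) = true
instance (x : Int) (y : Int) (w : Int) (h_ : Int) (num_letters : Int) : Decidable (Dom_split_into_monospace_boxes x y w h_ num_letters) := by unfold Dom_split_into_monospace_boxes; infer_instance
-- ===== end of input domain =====

-- B replaces A's indexed single pass by a divide-and-conquer recursion on the run of letters (objective: alternative).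

-- ===== PORT A =====
def split_into_monospace_boxes (x : Int) (y : Int) (w : Int) (h_ : Int) (num_letters : Int) : List (Int × Int × Int × Int) :=
  let letter_width := PySem.Int.floordiv w num_letters
  (PySem.List.pyRange 0 num_letters 1).foldl
    (fun split_boxes i =>
      let letter_x := x + i * letter_width
      let letter_w := if i < num_letters - 1 then letter_width else w - i * letter_width
      split_boxes ++ [(letter_x, y, letter_w, h_)]) []

-- ===== PORT B =====
-- the inner recursive helper 'go' (k ≤ 0 in Python corresponds to k = 0 on Nat via toNat)
def pvAltGo (y h_ lw : Int) (cur_x rem_w : Int) (k : Nat) : List (Int × Int × Int × Int) :=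
  if k = 0 then []
  else if k = 1 then [(cur_x, y, rem_w, h_)]
  else
    let m := k / 2
    pvAltGo y h_ lw cur_x (m * lw) m ++
    pvAltGo y h_ lw (cur_x + m * lw) (rem_w - m * lw) (k - m)
termination_by k
decreasing_by all_goals omega

def split_into_monospace_boxes_alt (x : Int) (y : Int) (w : Int) (h_ : Int) (num_letters : Int) : List (Int × Int × Int × Int) :=
  let letter_width := PySem.Int.floordiv w num_letters
  pvAltGo y h_ letter_width x w num_letters.toNat

-- ===== PRECONDITION & SPEC =====
-- Python raises ZeroDivisionError on 'w // num_letters' when num_letters == 0.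
def Pre_split_into_monospace_boxes (x : Int) (y : Int) (w : Int) (h_ : Int) (num_letters : Int) : Prop := num_letters ≠ 0
instance (x : Int) (y : Int) (w : Int) (h_ : Int) (num_letters : Int) : Decidable (Pre_split_into_monospace_boxes x y w h_ num_letters) := by unfold Pre_split_into_monospace_boxes; infer_instance
def pvWitness_split_into_monospace_boxes : Int × Int × Int × Int × Int := (10, 5, 30, 7, 4)

def Spec_split_into_monospace_boxes (x : Int) (y : Int) (w : Int) (h_ : Int) (num_letters : Int) (out : List (Int × Int × Int × Int)) : Prop := out = split_into_monospace_boxes_alt x y w h_ num_letters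
instance (x : Int) (y : Int) (w : Int) (h_ : Int) (num_letters : Int) (out : List (Int × Int × Int × Int)) : Decidable (Spec_split_into_monospace_boxes x y w h_ num_letters out) := by unfold Spec_split_into_monospace_boxes; infer_instance

-- ===== CLAIM =====
def Claim_equal_split_into_monospace_boxes : Prop := ∀ (x : Int) (y : Int) (w : Int) (h_ : Int) (num_letters : Int), Dom_split_into_monospace_boxes x y w h_ num_letters → Pre_split_into_monospace_boxes x y w h_ num_letters → Spec_split_into_monospace_boxes x y w h_ num_letters (split_into_monospace_boxes x y w h_ num_letters)

-- ===== LEMMAS AND PROOFS =====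

-- closed-form characterisation of the divide-and-conquer helper
lemma pvAltGo_eq_map (y h_ lw : Int) (k : Nat) : ∀ (cx rw : Int),
    pvAltGo y h_ lw cx rw k =
      (List.range k).map (fun (j : Nat) =>
        (cx + (j : Int) * lw, y, if (j : Int) < (k : Int) - 1 then lw else rw - (j : Int) * lw, h_)) := by
  induction k using Nat.strong_induction_on with
  | _ k ih =>
    intro cx rw
    rw [pvAltGo]
    by_cases h0 : k = 0
    · subst h0; simp
    · by_cases h1 : k = 1
      · subst h1; simp
      · simp only [h0, h1, if_false]
        have hm1 : 1 ≤ k / 2 := by omega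
        have hmk : k / 2 < k := by omega
        rw [ih (k / 2) hmk, ih (k - k / 2) (by omega)]
        have hsplit : k = k / 2 + (k - k / 2) := by omega
        conv_rhs => rw [hsplit, List.range_add]
        rw [List.map_append, List.map_map]
        congr 1
        · apply List.map_congr_left
          intro j hj
          rw [List.mem_range] at hj
          simp only [Prod.mk.injEq, true_and, and_true]
          split_ifs with h1 h2
          · rfl
          · exfalso; omega
          · have hj' : (j : Int) = ((k / 2 : Nat) : Int) - 1 := by omega
            rw [hj']; ring
          · exfalso; omega
        · apply List.map_congr_left
          intro j hj
          rw [List.mem_range] at hj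
          simp only [Function.comp, Nat.cast_add, Prod.mk.injEq, true_and, and_true]
          refine ⟨by ring, ?_⟩
          split_ifs with h1 h2
          · rfl
          · exfalso; omega
          · exfalso; omega
          · ring

-- ===== VERDICT =====
theorem split_into_monospace_boxes_spec : Claim_equal_split_into_monospace_boxes := by
  intro x y w h_ n _ _
  unfold Spec_split_into_monospace_boxes split_into_monospace_boxes split_into_monospace_boxes_alt
  rw [PySem.List.foldl_append_singleton_eq_map]
  simp only [List.nil_append]
  rw [pvAltGo_eq_map, PySem.List.pyRange_one, List.map_map]
  by_cases hn : 0 ≤ n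
  · have hcast : ((n.toNat : Nat) : Int) = n := by omega
    have hlen : (n - 0).toNat = n.toNat := by omega
    rw [hlen]
    apply List.map_congr_left
    intro j hj
    rw [List.mem_range] at hj
    simp only [Function.comp]
    rw [hcast]
    simp [zero_add]
  · have h0 : (n - 0).toNat = 0 := by omega
    have h0' : n.toNat = 0 := by omega
    rw [h0, h0']
    simp
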